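-- pv_equiv track=rewrite | github.com/jcraig949jfi/Prometheus | harmonia/scripts/ap_compression.py | lz_complexity
-- ===== SOURCE A (Python) =====
-- def lz_complexity(traces, n=50):
--     """LZ complexity: number of distinct substrings in Lempel-Ziv decomposition."""
--     s = ''.join(str(v) + ',' for v in traces[:n])
--     n_len = len(s)
--     i, complexity = 0, 0
--     seen = set()
--     current = ''
--     for ch in s:
--         current += ch
--         if current not in seen:
--             seen.add(current)
--             complexity += 1
--             current = ''
--     if current:
--         complexity += 1
--     return complexity
-- ===== SOURCE B (Python) =====
-- def lz_complexity(traces, n=50):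
--     """LZ complexity via an explicit trie of phrase prefixes (flat child map)."""
--     s = ''.join(str(v) + ',' for v in traces[:n])
--     children = {}   # (node_id, char) -> child node_id
--     node = 0        # current trie node; 0 is the root
--     next_id = 1
--     complexity = 0
--     for ch in s:
--         key = (node, ch)
--         if key in children:
--             node = children[key]
--         else:
--             children[key] = next_id
--             next_id += 1
--             complexity += 1
--             node = 0
--     if node != 0:
--         complexity += 1
--     return complexity
-- ===== Notes on version B (the rewrite author's own statement) =====
-- stated objective: alternative
-- what changed: Replaces A's set of phrase strings (membership test on the growing current phrase) with an explicit trie stored as a flat (node,char)->node dict walked by a node pointer that resets to the root when a new phrase is created.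
import Mathlib
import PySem

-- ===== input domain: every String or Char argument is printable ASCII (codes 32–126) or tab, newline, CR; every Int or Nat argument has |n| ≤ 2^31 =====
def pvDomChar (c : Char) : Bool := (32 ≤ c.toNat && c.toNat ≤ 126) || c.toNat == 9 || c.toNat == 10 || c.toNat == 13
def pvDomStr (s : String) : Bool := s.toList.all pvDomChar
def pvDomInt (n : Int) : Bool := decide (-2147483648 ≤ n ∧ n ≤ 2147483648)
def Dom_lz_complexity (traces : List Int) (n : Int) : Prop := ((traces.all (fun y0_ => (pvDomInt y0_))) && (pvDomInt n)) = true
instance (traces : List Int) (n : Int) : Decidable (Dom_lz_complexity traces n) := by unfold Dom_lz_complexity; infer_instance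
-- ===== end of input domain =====

-- B replaces A's set of phrase strings by an explicit trie stored as a flat (node,char)->node map
-- walked by a node pointer (alternative data structure; same result).

-- ===== PORT A =====
-- the loop 'for ch in s' with state (complexity, seen, current); Python's unused 'i' is dropped
def lzWalkA : List Char → Int → PySem.Set (List Char) → List Char → (Int × PySem.Set (List Char) × List Char)
  | [], k, seen, cur => (k, seen, cur)
  | c :: rest, k, seen, cur =>
    let cur' := cur ++ [c]
    if cur' ∈ seen then lzWalkA rest k seen cur'
    else lzWalkA rest (k + 1) (PySem.Set.add seen cur') []

def lz_complexity (traces : List Int) (n : Int) : Int :=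
  let s : List Char := (PySem.List.slice traces none (some n)).flatMap
    (fun v => PySem.Int.toChars v ++ [','])
  let r := lzWalkA s 0 PySem.Set.empty []
  if r.2.2 ≠ [] then r.1 + 1 else r.1

-- ===== PORT B =====
-- the loop 'for ch in s' with state (complexity, children, next_id, node)
def lzWalkB : List Char → Int → PySem.Dict (Int × Char) Int → Int → Int →
    (Int × PySem.Dict (Int × Char) Int × Int × Int)
  | [], k, children, nid, node => (k, children, nid, node)
  | c :: rest, k, children, nid, node =>
    match children.get? (node, c) with
    | some j => lzWalkB rest k children nid j
    | none => lzWalkB rest (k + 1) (children.insert (node, c) nid) (nid + 1) 0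

def lz_complexity_alt (traces : List Int) (n : Int) : Int :=
  let s : List Char := (PySem.List.slice traces none (some n)).flatMap
    (fun v => PySem.Int.toChars v ++ [','])
  let r := lzWalkB s 0 PySem.Dict.empty 1 0
  if r.2.2.2 ≠ 0 then r.1 + 1 else r.1

-- ===== PRECONDITION & SPEC =====
def Spec_lz_complexity (traces : List Int) (n : Int) (out : Int) : Prop := out = lz_complexity_alt traces n
instance (traces : List Int) (n : Int) (out : Int) : Decidable (Spec_lz_complexity traces n out) := by unfold Spec_lz_complexity; infer_instance

-- ===== CLAIM (what is proved, stated in full; the proofs are below) =====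
def Claim_equal_lz_complexity : Prop := ∀ (traces : List Int) (n : Int), Dom_lz_complexity traces n → Spec_lz_complexity traces n (lz_complexity traces n)

-- ===== LEMMAS AND PROOFS =====

-- simulation invariant between A's state (seen, cur) and B's state (children, nid, node),
-- via a labelling m of trie nodes by the phrase strings they represent
def LZInv (seen : PySem.Set (List Char)) (cur : List Char)
    (children : PySem.Dict (Int × Char) Int) (nid node : Int)
    (m : Int → List Char) : Prop :=
  m 0 = [] ∧ 1 ≤ nid ∧ 0 ≤ node ∧ node < nid ∧ m node = cur ∧
  (∀ i c j, children.get? (i, c) = some j → 0 ≤ i ∧ i < nid ∧ 0 ≤ j ∧ j < nid ∧ m j = m i ++ [c]) ∧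
  (∀ i j, 0 ≤ i → i < nid → 0 ≤ j → j < nid → m i = m j → i = j) ∧
  (∀ i c, 0 ≤ i → i < nid → ((children.get? (i, c)).isSome ↔ (m i ++ [c]) ∈ seen)) ∧
  ([] ∉ seen) ∧
  (∀ (w : List Char) (c : Char), (w ++ [c]) ∈ seen → w = [] ∨ w ∈ seen) ∧
  (∀ i, 1 ≤ i → i < nid → m i ∈ seen) ∧
  (cur = [] ∨ cur ∈ seen)

lemma lzWalk_sim : ∀ (s : List Char) (k : Int) (seen : PySem.Set (List Char)) (cur : List Char)
    (children : PySem.Dict (Int × Char) Int) (nid node : Int) (m : Int → List Char),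
    LZInv seen cur children nid node m →
    ∃ m', (lzWalkA s k seen cur).1 = (lzWalkB s k children nid node).1 ∧
      LZInv (lzWalkA s k seen cur).2.1 (lzWalkA s k seen cur).2.2
        (lzWalkB s k children nid node).2.1 (lzWalkB s k children nid node).2.2.1
        (lzWalkB s k children nid node).2.2.2 m' := by
  intro s
  induction s with
  | nil => intro k seen cur children nid node m h; exact ⟨m, rfl, h⟩
  | cons c rest ih =>
    intro k seen cur children nid node m h
    obtain ⟨hm0, hnid1, hnode0, hnodelt, hmnode, hchild, hinj, hiff, hempty, hpref, hmem, hcur⟩ := h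
    by_cases hin : (children.get? (node, c)).isSome
    · -- child exists: both take the "seen" branch
      obtain ⟨j, hj⟩ := Option.isSome_iff_exists.mp hin
      have hseen : cur ++ [c] ∈ seen := by
        have := (hiff node c hnode0 hnodelt).mp hin
        rwa [hmnode] at this
      obtain ⟨hj0, hjlt1, hj0', hjlt, hmj⟩ := hchild node c j hj
      simp only [lzWalkA, lzWalkB, hj, if_pos hseen]
      exact ih k seen (cur ++ [c]) children nid j m
        ⟨hm0, hnid1, hj0', hjlt, by rw [hmj, hmnode], hchild, hinj, hiff, hempty, hpref, hmem,
          Or.inr hseen⟩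
    · -- no child: both create a new phrase
      have hnone : children.get? (node, c) = none := by
        cases hg : children.get? (node, c) with
        | none => rfl
        | some j => exact absurd (by simp [hg]) hin
      have hnotseen : cur ++ [c] ∉ seen := by
        intro hmem'
        exact hin ((hiff node c hnode0 hnodelt).mpr (by rwa [hmnode]))
      simp only [lzWalkA, lzWalkB, hnone, if_neg hnotseen]
      set w := cur ++ [c] with hw
      set m' : Int → List Char := fun i => if i = nid then w else m i with hm'
      refine ih (k + 1) (PySem.Set.add seen w) [] (children.insert (node, c) nid) (nid + 1) 0 m' ?_
      have hm'nid : m' nid = w := by simp [hm']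
      have hm'old : ∀ i, i < nid → m' i = m i := by
        intro i hi
        show (if i = nid then w else m i) = m i
        rw [if_neg (by omega)]
      have hmemadd : ∀ x : List Char, x ∈ PySem.Set.add seen w ↔ x ∈ seen ∨ x = w :=
        fun x => PySem.Set.mem_add seen w x
      have hwne : w ≠ [] := by simp [hw]
      have hwnotmem : ∀ i, 0 ≤ i → i < nid → m i ≠ w := by
        intro i h0 hlt heq
        rcases (by omega : i = 0 ∨ 1 ≤ i) with h1 | h1
        · exact hwne (by rw [← heq, h1, hm0])
        · exact hnotseen (heq ▸ hmem i h1 hlt)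
      have hget' : ∀ (i : Int) (c' : Char),
          (children.insert (node, c) nid).get? (i, c') =
            if (i, c') = (node, c) then some nid else children.get? (i, c') :=
        fun i c' => PySem.Dict.get?_insert children (node, c) (i, c') nid
      refine ⟨?_, by omega, le_refl 0, by omega, ?_, ?_, ?_, ?_, ?_, ?_, ?_, Or.inl rfl⟩
      · rw [hm'old 0 (by omega), hm0]
      · rw [hm'old 0 (by omega), hm0]
      · -- child facts
        intro i c' j hget
        rw [hget'] at hget
        split_ifs at hget with heq
        · rw [Prod.mk.injEq] at heq
          obtain ⟨h1, h2⟩ := heq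
          cases hget
          refine ⟨by omega, by omega, by omega, by omega, ?_⟩
          rw [hm'nid, hm'old i (by omega), h1, h2, hmnode, hw]
        · obtain ⟨g1, g2, g3, g4, g5⟩ := hchild i c' j hget
          exact ⟨g1, by omega, g3, by omega, by rw [hm'old j g4, hm'old i g2, g5]⟩
      · -- injectivity
        intro i j h0i hilt h0j hjlt heq
        rcases (by omega : i < nid ∨ i = nid) with hi | hi <;>
          rcases (by omega : j < nid ∨ j = nid) with hj | hj
        · exact hinj i j h0i hi h0j hj (by rwa [hm'old i hi, hm'old j hj] at heq)
        · exact absurd (by rwa [hm'old i hi, hj, hm'nid] at heq) (hwnotmem i h0i hi)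
        · refine absurd ?_ (hwnotmem j h0j hj)
          rw [hi, hm'nid, hm'old j hj] at heq
          exact heq.symm
        · omega
      · -- membership iff
        intro i c' h0i hilt
        rw [hget']
        rcases (by omega : i < nid ∨ i = nid) with hi | hi
        · rw [hm'old i hi, hmemadd]
          by_cases heq : (i, c') = (node, c)
          · rw [Prod.mk.injEq] at heq
            obtain ⟨h1, h2⟩ := heq
            rw [if_pos (by rw [Prod.mk.injEq]; exact ⟨h1, h2⟩)]
            simp only [Option.isSome_some, true_iff]
            exact Or.inr (by rw [hw, h1, h2, hmnode])
          · rw [if_neg heq]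
            rw [hiff i c' h0i hi]
            constructor
            · exact fun h => Or.inl h
            · rintro (h | h)
              · exact h
              · exfalso
                rw [hw] at h
                have hcur_eq : m i = cur := List.append_inj_left' h rfl
                have hc_eq : c' = c := by
                  have := List.append_inj_right' h rfl
                  simpa using this
                have : i = node := hinj i node h0i hi hnode0 hnodelt (by rw [hcur_eq, hmnode])
                exact heq (by rw [this, hc_eq])
        · -- i = nid : new node has no children, and w ++ [c'] ∉ seen'
          have hnone2 : children.get? (i, c') = none := by
            cases hg : children.get? (i, c') with
            | none => rfl
            | some j =>
              obtain ⟨_, h2, _⟩ := hchild i c' j hg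
              omega
          rw [if_neg (by rw [Prod.mk.injEq]; rintro ⟨h1, _⟩; omega), hnone2, hi, hm'nid, hmemadd]
          simp only [Option.isSome_none, Bool.false_eq_true, false_iff]
          rintro (h | h)
          · rcases hpref w c' h with h' | h'
            · exact hwne h'
            · exact hnotseen h'
          · have := congrArg List.length h
            simp at this
      · -- [] ∉ seen'
        rw [hmemadd]
        rintro (h | h)
        · exact hempty h
        · exact hwne h.symm
      · -- prefix closure
        intro v c' hv
        rw [hmemadd] at hv ⊢
        rcases hv with hv1 | hv2
        · rcases hpref v c' hv1 with h | h
          · exact Or.inl h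
          · exact Or.inr (Or.inl h)
        · rw [hw] at hv2
          have hveq : v = cur := List.append_inj_left' hv2 rfl
          rcases hcur with h | h
          · exact Or.inl (hveq.trans h)
          · exact Or.inr (Or.inl (hveq ▸ h))
      · -- phrase strings of real nodes are in seen'
        intro i h1i hilt
        rcases (by omega : i < nid ∨ i = nid) with hi | hi
        · rw [hm'old i hi, hmemadd]; exact Or.inl (hmem i h1i hi)
        · subst hi; rw [hm'nid, hmemadd]; exact Or.inr rfl

lemma lzInv_init : LZInv PySem.Set.empty [] PySem.Dict.empty 1 0 (fun _ => []) := by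
  refine ⟨rfl, le_refl 1, le_refl 0, by omega, rfl, ?_, ?_, ?_, ?_, ?_, ?_, Or.inl rfl⟩
  · intro i c j h; simp [PySem.Dict.empty, PySem.Dict.get?] at h
  · intro i j h0i hi h0j hj _; omega
  · intro i c _ _; simp [PySem.Dict.empty, PySem.Dict.get?, PySem.Set.empty]
  · simp [PySem.Set.empty]
  · intro w c h; simp [PySem.Set.empty] at h
  · intro i h1 h2; omega

-- ===== VERDICT (by name: the statement is the Claim_ definition above) =====
theorem lz_complexity_spec : Claim_equal_lz_complexity := by
  intro traces n _
  unfold Spec_lz_complexity lz_complexity lz_complexity_alt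
  dsimp only
  set s : List Char := (PySem.List.slice traces none (some n)).flatMap
    (fun v => PySem.Int.toChars v ++ [','])
  obtain ⟨m', hk, hinv⟩ := lzWalk_sim s 0 PySem.Set.empty [] PySem.Dict.empty 1 0
    (fun _ => []) lzInv_init
  obtain ⟨hm0, _, hnode0, hnodelt, hmnode, _, hinj, _⟩ := hinv
  have hiff : (lzWalkA s 0 PySem.Set.empty []).2.2 = [] ↔
      (lzWalkB s 0 PySem.Dict.empty 1 0).2.2.2 = 0 := by
    constructor
    · intro h
      exact hinj _ 0 hnode0 hnodelt (le_refl 0) (by omega) (by rw [hmnode, h, hm0])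
    · intro h
      rw [← hmnode, h, hm0]
  rw [hk]
  by_cases hnil : (lzWalkB s 0 PySem.Dict.empty 1 0).2.2.2 = 0
  · rw [if_neg (by simpa using hiff.mpr hnil), if_neg (by simpa using hnil)]
  · rw [if_pos (by simpa using fun h => hnil (hiff.mp h)), if_pos (by simpa using hnil)]
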